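-- pv_equiv track=rewrite | github.com/aramidefemi/Research-assistant-agent | app.py | _deterministic_chat_answer
-- ===== SOURCE A (Python) =====
-- def _split_sentences(text: str) -> list[str]:
--     raw = (text or "").replace("\n", " ").strip()
--     if not raw:
--         return []
--     parts: list[str] = []
--     buf = []
--     for ch in raw:
--         buf.append(ch)
--         if ch in ".!?":
--             sentence = "".join(buf).strip()
--             if sentence:
--                 parts.append(sentence)
--             buf = []
--     tail = "".join(buf).strip()
--     if tail:
--         parts.append(tail)
--     return parts
--
-- def _keyword_overlap_score(question: str, sentence: str) -> int:
--     q_terms = {w.lower() for w in question.split() if len(w) >= 4}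
--     if not q_terms:
--         return 0
--     s_terms = {w.lower().strip(".,:;()[]{}") for w in sentence.split()}
--     return len(q_terms.intersection(s_terms))
--
-- def _deterministic_chat_answer(question: str, docs: list[dict[str, str]]) -> str:
--     ranked: list[tuple[int, str, str]] = []
--     for doc in docs:
--         source = doc["source"]
--         for sent in _split_sentences(doc["text"]):
--             score = _keyword_overlap_score(question, sent)
--             if score > 0:
--                 ranked.append((score, sent, source))
--     if not ranked:
--         return (
--             "Insufficient evidence in selected papers to answer confidently.\n\n"
--             "Citations:\n- [none]"
--         )
--     ranked.sort(key=lambda x: x[0], reverse=True)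
--     top = ranked[:3]
--     bullets = "\n".join(f"- {sent} [{src}]" for _, sent, src in top)
--     cites = "\n".join(f"- [{src}]" for _, _, src in top)
--     return f"Best evidence from selected papers:\n{bullets}\n\nCitations:\n{cites}"
-- ===== SOURCE B (Python) =====
-- # B: hoist the question-keyword set out of the loop and keep a bounded, score-descending
-- # top-3 list by stable insertion instead of fully sorting all ranked sentences at the end.
--
-- def _split_sentences(text: str) -> list[str]:
--     raw = (text or "").replace("\n", " ").strip()
--     if not raw:
--         return []
--     parts: list[str] = []
--     buf = []
--     for ch in raw:
--         buf.append(ch)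
--         if ch in ".!?":
--             sentence = "".join(buf).strip()
--             if sentence:
--                 parts.append(sentence)
--             buf = []
--     tail = "".join(buf).strip()
--     if tail:
--         parts.append(tail)
--     return parts
--
-- def _insert_top3(top, item):
--     # top is score-descending and stable (earlier sentences first among equal
--     # scores); insert item after all entries with score >= item's, cap at 3.
--     if not top or item[0] > top[0][0]:
--         return ([item] + top)[:3]
--     return ([top[0]] + _insert_top3(top[1:], item))[:3]
--
-- def _deterministic_chat_answer(question: str, docs: list[dict[str, str]]) -> str:
--     q_terms = {w.lower() for w in question.split() if len(w) >= 4}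
--     top: list[tuple[int, str, str]] = []
--     for doc in docs:
--         source = doc["source"]
--         for sent in _split_sentences(doc["text"]):
--             s_terms = {w.lower().strip(".,:;()[]{}") for w in sent.split()}
--             score = len(q_terms & s_terms)
--             if score > 0:
--                 top = _insert_top3(top, (score, sent, source))
--     if not top:
--         return (
--             "Insufficient evidence in selected papers to answer confidently.\n\n"
--             "Citations:\n- [none]"
--         )
--     bullets = "\n".join(f"- {sent} [{src}]" for _, sent, src in top)
--     cites = "\n".join(f"- [{src}]" for _, _, src in top)
--     return f"Best evidence from selected papers:\n{bullets}\n\nCitations:\n{cites}"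
-- ===== Notes on version B (the rewrite author's own statement) =====
-- stated objective: alternative
-- what changed: B hoists the question-keyword set out of the sentence loop (dropping the redundant empty-set guard) and replaces the final full stable reverse sort plus [:3] with a bounded stable top-3 insertion maintained during the scan.
import Mathlib
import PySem

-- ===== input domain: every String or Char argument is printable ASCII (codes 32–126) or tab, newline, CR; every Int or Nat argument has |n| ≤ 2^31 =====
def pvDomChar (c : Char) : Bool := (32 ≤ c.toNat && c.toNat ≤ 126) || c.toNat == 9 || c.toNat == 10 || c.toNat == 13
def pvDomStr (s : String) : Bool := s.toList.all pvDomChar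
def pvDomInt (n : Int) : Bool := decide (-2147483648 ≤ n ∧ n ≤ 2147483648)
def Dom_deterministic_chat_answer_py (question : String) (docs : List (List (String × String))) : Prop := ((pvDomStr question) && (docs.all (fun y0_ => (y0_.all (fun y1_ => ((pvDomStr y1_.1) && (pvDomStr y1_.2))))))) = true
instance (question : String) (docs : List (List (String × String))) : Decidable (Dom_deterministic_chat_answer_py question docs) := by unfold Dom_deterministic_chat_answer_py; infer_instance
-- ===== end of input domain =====

-- B replaces the final full sort of all scored sentences by a bounded stable top-3 insertion
-- maintained during the scan, and hoists the question-keyword set out of the loop (objective: alternative).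

-- ===== PORT A =====
-- _split_sentences (helper of A; B keeps it unchanged, so both ports use it)
def splitSentencesPy (text : String) : List String :=
  -- 'text or ""' equals text for strings (falsy string is "")
  let raw := PySem.Str.strip (PySem.Str.replace text "\n" " ")
  if raw = "" then []
  else
    -- for ch in raw: buf.append(ch); if ch in ".!?": flush buf   (state = (parts, buf));
    -- 'ch in ".!?"' on a single char is char membership in the three chars
    let st := raw.toList.foldl (fun (st : List String × List Char) ch =>
      let buf := st.2 ++ [ch]
      if (".!?".toList.contains ch) then
        let sentence := PySem.Chars.strip buf
        (if sentence ≠ [] then st.1 ++ [String.ofList sentence] else st.1, ([] : List Char))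
      else (st.1, buf)) (([] : List String), ([] : List Char))
    let tail := PySem.Chars.strip st.2
    if tail ≠ [] then st.1 ++ [String.ofList tail] else st.1

-- _keyword_overlap_score (helper of A)
def keywordOverlapScorePy (question sentence : String) : Int :=
  let qTerms : PySem.Set String :=
    PySem.Set.ofList (((PySem.Str.split₀ question).filter (fun w => decide (4 ≤ PySem.Str.len w))).map PySem.Str.lower)
  if qTerms = [] then 0
  else
    let sTerms : PySem.Set String :=
      PySem.Set.ofList ((PySem.Str.split₀ sentence).map (fun w => PySem.Str.stripChars (PySem.Str.lower w) ".,:;()[]{}"))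
    ((PySem.Set.inter qTerms sTerms).length : Int)

def deterministic_chat_answer_py (question : String) (docs : List (List (String × String))) : String :=
  let ranked : List (Int × String × String) :=
    docs.foldl (fun ranked doc =>
      let d : PySem.Dict String String := PySem.Dict.mk doc
      let source := (PySem.Dict.get? d "source").getD ""   -- doc["source"]; missing key (KeyError) excluded by Pre_
      (splitSentencesPy ((PySem.Dict.get? d "text").getD "")).foldl (fun ranked sent =>
        let score := keywordOverlapScorePy question sent
        if score > 0 then ranked ++ [(score, sent, source)] else ranked) ranked) []
  if ranked = [] then
    "Insufficient evidence in selected papers to answer confidently.\n\nCitations:\n- [none]"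
  else
    let top := PySem.List.slice (PySem.List.sorted ranked (fun x => x.1) true) none (some 3)   -- ranked.sort(reverse=True)[:3]
    let bullets := PySem.Str.join "\n" (top.map (fun x => "- " ++ x.2.1 ++ " [" ++ x.2.2 ++ "]"))
    let cites := PySem.Str.join "\n" (top.map (fun x => "- [" ++ x.2.2 ++ "]"))
    "Best evidence from selected papers:\n" ++ bullets ++ "\n\nCitations:\n" ++ cites

-- ===== PORT B =====
-- _insert_top3: stable bounded insertion (after all entries with score >= item's), capped at 3
def insertTop3 (top : List (Int × String × String)) (item : Int × String × String) : List (Int × String × String) :=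
  match top with
  | [] => ([item]).take 3
  | y :: ys => if item.1 > y.1 then (item :: y :: ys).take 3
               else (y :: insertTop3 ys item).take 3

def deterministic_chat_answer_py_alt (question : String) (docs : List (List (String × String))) : String :=
  let qTerms : PySem.Set String :=
    PySem.Set.ofList (((PySem.Str.split₀ question).filter (fun w => decide (4 ≤ PySem.Str.len w))).map PySem.Str.lower)
  let top : List (Int × String × String) :=
    docs.foldl (fun top doc =>
      let d : PySem.Dict String String := PySem.Dict.mk doc
      let source := (PySem.Dict.get? d "source").getD ""   -- doc["source"]; missing key (KeyError) excluded by Pre_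
      (splitSentencesPy ((PySem.Dict.get? d "text").getD "")).foldl (fun top sent =>
        let sTerms : PySem.Set String :=
          PySem.Set.ofList ((PySem.Str.split₀ sent).map (fun w => PySem.Str.stripChars (PySem.Str.lower w) ".,:;()[]{}"))
        let score : Int := ((PySem.Set.inter qTerms sTerms).length : Int)
        if score > 0 then insertTop3 top (score, sent, source) else top) top) []
  if top = [] then
    "Insufficient evidence in selected papers to answer confidently.\n\nCitations:\n- [none]"
  else
    let bullets := PySem.Str.join "\n" (top.map (fun x => "- " ++ x.2.1 ++ " [" ++ x.2.2 ++ "]"))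
    let cites := PySem.Str.join "\n" (top.map (fun x => "- [" ++ x.2.2 ++ "]"))
    "Best evidence from selected papers:\n" ++ bullets ++ "\n\nCitations:\n" ++ cites

-- ===== PRECONDITION & SPEC =====
-- Pre_ excludes exactly the docs lacking a "source" or "text" key, on which A raises KeyError (B raises there too).
def Pre_deterministic_chat_answer_py (question : String) (docs : List (List (String × String))) : Prop :=
  ∀ doc ∈ docs, (PySem.Dict.mk doc).contains "source" = true ∧ (PySem.Dict.mk doc).contains "text" = true
instance (question : String) (docs : List (List (String × String))) : Decidable (Pre_deterministic_chat_answer_py question docs) := by unfold Pre_deterministic_chat_answer_py; infer_instance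

def pvWitness_deterministic_chat_answer_py : String × (List (List (String × String))) :=
  ("what is gravity theory", [[("source", "p1"), ("text", "Gravity theory explains motion. Nothing else here.")]])

def Spec_deterministic_chat_answer_py (question : String) (docs : List (List (String × String))) (out : String) : Prop := out = deterministic_chat_answer_py_alt question docs
instance (question : String) (docs : List (List (String × String))) (out : String) : Decidable (Spec_deterministic_chat_answer_py question docs out) := by unfold Spec_deterministic_chat_answer_py; infer_instance

-- ===== CLAIM (what is proved, stated in full; the proofs are below) =====
def Claim_equal_deterministic_chat_answer_py : Prop := ∀ (question : String) (docs : List (List (String × String))), Dom_deterministic_chat_answer_py question docs → Pre_deterministic_chat_answer_py question docs → Spec_deterministic_chat_answer_py question docs (deterministic_chat_answer_py question docs)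

-- ===== LEMMAS AND PROOFS =====

-- the comparison PySem's stable reverse sort (by first component) inserts with
def pvBRev (a b : Int × String × String) : Bool := decide (b.1 < a.1)

-- the per-document list of scored sentences both collection loops produce
def pvItems (question : String) (doc : List (String × String)) : List (Int × String × String) :=
  ((splitSentencesPy ((PySem.Dict.get? (PySem.Dict.mk doc) "text").getD "")).filter
      (fun sent => decide (keywordOverlapScorePy question sent > 0))).map
    (fun sent => (keywordOverlapScorePy question sent, sent,
      (PySem.Dict.get? (PySem.Dict.mk doc) "source").getD ""))

-- B's inline score (with the keyword set hoisted) equals A's helper: the empty-set guard is redundant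
lemma pv_score_eq (q s : String) :
    ((PySem.Set.inter
        (PySem.Set.ofList (((PySem.Str.split₀ q).filter (fun w => decide (4 ≤ PySem.Str.len w))).map PySem.Str.lower))
        (PySem.Set.ofList ((PySem.Str.split₀ s).map (fun w => PySem.Str.stripChars (PySem.Str.lower w) ".,:;()[]{}")))).length : Int)
      = keywordOverlapScorePy q s := by
  unfold keywordOverlapScorePy
  by_cases h : (PySem.Set.ofList (((PySem.Str.split₀ q).filter (fun w => decide (4 ≤ PySem.Str.len w))).map PySem.Str.lower)) = ([] : List String)
  · rw [if_pos h, h]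
    simp [PySem.Set.inter]
  · rw [if_neg h]

-- truncation commutes with stable insertion
lemma pv_take_insertBy (n : Nat) (x : Int × String × String) (s : List (Int × String × String)) :
    (PySem.List.insertBy pvBRev x s).take n = (PySem.List.insertBy pvBRev x (s.take n)).take n := by
  induction s generalizing n with
  | nil => simp
  | cons y ys ih =>
    cases n with
    | zero => simp
    | succ m =>
      by_cases h : pvBRev x y
      · simp only [PySem.List.insertBy, h, if_true, List.take_succ_cons]
        cases m with
        | zero => simp
        | succ k => simp [List.take_succ_cons, List.take_take]
      · simp [PySem.List.insertBy, h, List.take_succ_cons, ih m]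

-- on lists of length ≤ 3, insertTop3 is stable insertion followed by truncation
lemma pv_insertTop3_eq (x : Int × String × String) (t : List (Int × String × String)) (h : t.length ≤ 3) :
    insertTop3 t x = (PySem.List.insertBy pvBRev x t).take 3 := by
  induction t with
  | nil => simp [insertTop3, PySem.List.insertBy]
  | cons y ys ih =>
    by_cases hc : y.1 < x.1
    · have hb : pvBRev x y = true := by simp [pvBRev, hc]
      simp [insertTop3, PySem.List.insertBy, hc, hb]
    · have hb : pvBRev x y = false := by simp [pvBRev, hc]
      have hlen : ys.length ≤ 3 := by simp at h; omega
      simp only [insertTop3, if_neg (fun hx => hc hx), PySem.List.insertBy, hb]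
      rw [ih hlen]
      simp [List.take_succ_cons, List.take_take]

lemma pv_foldl_insertTop3 (xs : List (Int × String × String)) (s : List (Int × String × String)) :
    xs.foldl insertTop3 (s.take 3) = (xs.foldl (fun acc x => PySem.List.insertBy pvBRev x acc) s).take 3 := by
  induction xs generalizing s with
  | nil => rfl
  | cons x xs ih =>
    simp only [List.foldl_cons]
    rw [pv_insertTop3_eq x (s.take 3) (by simp), ← pv_take_insertBy, ih]

-- the bounded-insertion scan computes the first three of the stable reverse sort
lemma pv_top3_eq (xs : List (Int × String × String)) :
    xs.foldl insertTop3 [] = (PySem.List.sorted xs (fun x => x.1) true).take 3 := by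
  rw [PySem.List.sorted_rev_eq_foldl_insertBy]
  have := pv_foldl_insertTop3 xs []
  simpa [pvBRev] using this

-- A's collection loop builds the flatMap of per-doc scored sentences
lemma pv_rankedA (q : String) (docs : List (List (String × String))) (acc : List (Int × String × String)) :
    docs.foldl (fun ranked doc =>
      (splitSentencesPy ((PySem.Dict.get? (PySem.Dict.mk doc) "text").getD "")).foldl (fun ranked sent =>
        if keywordOverlapScorePy q sent > 0 then
          ranked ++ [(keywordOverlapScorePy q sent, sent, (PySem.Dict.get? (PySem.Dict.mk doc) "source").getD "")]
        else ranked) ranked) acc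
      = acc ++ docs.flatMap (pvItems q) := by
  induction docs generalizing acc with
  | nil => simp
  | cons doc docs ih =>
    simp only [List.foldl_cons, List.flatMap_cons]
    rw [PySem.List.foldl_append_ite (p := fun sent => keywordOverlapScorePy q sent > 0)
      (f := fun sent => (keywordOverlapScorePy q sent, sent, (PySem.Dict.get? (PySem.Dict.mk doc) "source").getD ""))]
    rw [ih]
    simp [pvItems, List.append_assoc]

-- B's collection loop folds insertTop3 over the same flatMap
lemma pv_topB (q : String) (docs : List (List (String × String))) (t : List (Int × String × String)) :
    docs.foldl (fun top doc =>
      (splitSentencesPy ((PySem.Dict.get? (PySem.Dict.mk doc) "text").getD "")).foldl (fun top sent =>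
        if keywordOverlapScorePy q sent > 0 then
          insertTop3 top (keywordOverlapScorePy q sent, sent, (PySem.Dict.get? (PySem.Dict.mk doc) "source").getD "")
        else top) top) t
      = (docs.flatMap (pvItems q)).foldl insertTop3 t := by
  induction docs generalizing t with
  | nil => rfl
  | cons doc docs ih =>
    simp only [List.foldl_cons, List.flatMap_cons, List.foldl_append]
    rw [PySem.List.foldl_ite_eq_foldl_filter (p := fun sent => keywordOverlapScorePy q sent > 0)
      (f := fun top sent => insertTop3 top (keywordOverlapScorePy q sent, sent, (PySem.Dict.get? (PySem.Dict.mk doc) "source").getD ""))]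
    rw [ih]
    simp [pvItems, List.foldl_map]

-- ===== VERDICT (by name: the statement is the Claim_ definition above) =====
theorem deterministic_chat_answer_py_spec : Claim_equal_deterministic_chat_answer_py := by
  intro question docs _hdom _hpre
  unfold Spec_deterministic_chat_answer_py
  unfold deterministic_chat_answer_py deterministic_chat_answer_py_alt
  simp only [pv_score_eq]
  rw [pv_rankedA question docs [], pv_topB question docs [], pv_top3_eq]
  simp only [List.nil_append]
  rw [PySem.List.slice_to _ (by norm_num : (0:Int) ≤ 3)]
  by_cases hi : docs.flatMap (pvItems question) = []
  · simp [hi, PySem.List.sorted_eq_nil_iff]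
  · have h3 : ((PySem.List.sorted (docs.flatMap (pvItems question)) (fun x => x.1) true).take (3:Int).toNat : List (Int × String × String)) ≠ [] := by
      simp [List.take_eq_nil_iff, PySem.List.sorted_eq_nil_iff, hi]
    rw [if_neg hi, if_neg (by simpa using h3)]
    simp only [show Int.toNat 3 = 3 from rfl]
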